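-- pv_equiv track=rewrite | github.com/Grooomit/Algorithm_exercise | baekjoon/array/lv2_거리두기-확인하기.py | dfs
-- ===== SOURCE A (Python) =====
-- def dfs(y, x, n, place):
--     arr = [(y, x, n, place)]
--     dy = (0, -1, 0, 1)
--     dx = (1, 0, -1, 0)
--     while arr:
--         ny, nx, n, place = arr.pop()
--         if n >= 2:
--             continue
--
--         for k in range(4):
--             ey = ny + dy[k]
--             ex = nx + dx[k]
--
--             if 0<=ey<5 and 0<=ex<5:
--                 if n<2 and place[ey][ex] == "P" and (ey != y and ex != x):
--                     return True
--                 elif place[ey][ex] == "O":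
--                     arr.append((ey, ex, n+1, place))
--     return False
-- ===== SOURCE B (Python) =====
-- def dfs(y, x, n, place):
--     def explore(cy, cx, n):
--         if n >= 2:
--             return False
--         for dy, dx in ((0, 1), (-1, 0), (0, -1), (1, 0)):
--             ey, ex = cy + dy, cx + dx
--             if 0 <= ey < 5 and 0 <= ex < 5:
--                 c = place[ey][ex]
--                 if c == "P" and ey != y and ex != x:
--                     return True
--                 if c == "O" and explore(ey, ex, n + 1):
--                     return True
--         return False
--     return explore(y, x, n)
-- ===== Notes on version B (the rewrite author's own statement) =====
-- stated objective: simpler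
-- what changed: Replaces the explicit-stack worklist loop (tuples pushed/popped from a Python list) with a direct recursive helper explore(cy,cx,n) over the four neighbours, bounded by the same n<2 depth cap and with the same unrestricted revisiting and P-coordinate test against the original (y,x).
-- outside the precondition, e.g. on dfs(0, 0, 0, ['XXXXX', 'XXXXX', 'XXXXX', 'XXXXX', 'XX']): A returns False, B returns False; on dfs(2, 2, -1, ['XXXXX', 'XXXXX', 'XXXXX', 'XXXXX', 'XXXXX']): A returns False, B returns False
import Mathlib
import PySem

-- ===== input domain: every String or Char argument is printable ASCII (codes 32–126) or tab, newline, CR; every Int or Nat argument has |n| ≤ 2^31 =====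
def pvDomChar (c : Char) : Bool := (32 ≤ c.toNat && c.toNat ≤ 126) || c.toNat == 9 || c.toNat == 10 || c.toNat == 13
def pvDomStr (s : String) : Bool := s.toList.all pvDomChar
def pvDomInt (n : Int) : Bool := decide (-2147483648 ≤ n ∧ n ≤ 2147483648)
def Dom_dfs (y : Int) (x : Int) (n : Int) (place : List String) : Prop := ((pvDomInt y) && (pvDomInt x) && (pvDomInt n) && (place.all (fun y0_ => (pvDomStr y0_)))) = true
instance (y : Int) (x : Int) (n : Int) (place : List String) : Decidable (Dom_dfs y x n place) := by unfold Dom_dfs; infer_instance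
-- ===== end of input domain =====

-- B replaces A's explicit-stack worklist loop by a direct recursive neighbour search (same depth cap, same revisiting): a different decomposition, not faster.


-- ===== PORT A =====
-- place[ey][ex] (shared primitive for both ports; none = IndexError, excluded by Pre_)
def cellAt (place : List String) (ey ex : Int) : Option Char :=
  (PySem.List.pyGet? place ey).bind (fun row => PySem.Str.pyGet? row ex)

-- dy = (0, -1, 0, 1); dx = (1, 0, -1, 0)
def dyv : Nat → Int | 0 => 0 | 1 => -1 | 2 => 0 | _ => 1
def dxv : Nat → Int | 0 => 1 | 1 => 0 | 2 => -1 | _ => 0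

-- A's inner `for k in range(4)` loop: returns none on `return True`, otherwise the updated stack.
-- (The Python stack holds (y,x,n,place) tuples with `place` always the same object; it is kept as a parameter.)
def dfsInner (y x ny nx n : Int) (place : List String) (ks : List Nat)
    (arr : List (Int × Int × Int)) : Option (List (Int × Int × Int)) :=
  match ks with
  | [] => some arr
  | k :: ks' =>
    if 0 ≤ ny + dyv k ∧ ny + dyv k < 5 ∧ 0 ≤ nx + dxv k ∧ nx + dxv k < 5 then
      if n < 2 ∧ cellAt place (ny + dyv k) (nx + dxv k) = some 'P' ∧ (ny + dyv k ≠ y ∧ nx + dxv k ≠ x) then none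
      else if cellAt place (ny + dyv k) (nx + dxv k) = some 'O' then
        dfsInner y x ny nx n place ks' ((ny + dyv k, nx + dxv k, n + 1) :: arr)
      else dfsInner y x ny nx n place ks' arr
    else dfsInner y x ny nx n place ks' arr

-- termination measure for A's while-loop (each stack entry of depth n weighs 5^(2-n))
def wt (n : Int) : Nat := 5 ^ (2 - n).toNat
def stackMeasure (arr : List (Int × Int × Int)) : Nat := (arr.map (fun t => wt t.2.2)).sum

theorem stackMeasure_cons (a b c : Int) (arr : List (Int × Int × Int)) :
    stackMeasure ((a, b, c) :: arr) = wt c + stackMeasure arr := by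
  simp [stackMeasure]

theorem dfsInner_measure (y x ny nx n : Int) (place : List String) :
    ∀ (ks : List Nat) (arr arr' : List (Int × Int × Int)),
      dfsInner y x ny nx n place ks arr = some arr' →
      stackMeasure arr' ≤ ks.length * wt (n + 1) + stackMeasure arr := by
  intro ks
  induction ks with
  | nil =>
    intro arr arr' h
    rw [dfsInner] at h
    cases h
    simp
  | cons k ks' ih =>
    intro arr arr' h
    rw [dfsInner] at h
    split_ifs at h with h1 h2 h3
    · have hih := ih _ _ h
      rw [stackMeasure_cons] at hih
      simp only [List.length_cons, Nat.succ_mul]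
      omega
    · have hih := ih _ _ h
      simp only [List.length_cons, Nat.succ_mul]
      omega
    · have hih := ih _ _ h
      simp only [List.length_cons, Nat.succ_mul]
      omega

theorem wt_pos (n : Int) : 0 < wt n := Nat.pow_pos (by norm_num)

theorem wt_step (n : Int) (hn : ¬ 2 ≤ n) : 4 * wt (n + 1) + 1 ≤ wt n := by
  unfold wt
  have h : (2 - n).toNat = (2 - (n + 1)).toNat + 1 := by omega
  rw [h, pow_succ]
  have : 0 < 5 ^ (2 - (n + 1)).toNat := Nat.pow_pos (by norm_num)
  omega

-- A's `while arr:` loop; the stack is represented top-first (append = cons, pop = head).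
def dfsLoop (y x : Int) (place : List String) (arr : List (Int × Int × Int)) : Bool :=
  match arr with
  | [] => false
  | (ny, nx, n) :: rest =>
    if h2 : 2 ≤ n then dfsLoop y x place rest
    else
      match h : dfsInner y x ny nx n place [0, 1, 2, 3] rest with
      | none => true
      | some arr' => dfsLoop y x place arr'
termination_by stackMeasure arr
decreasing_by
  · rw [stackMeasure_cons]
    have := wt_pos n; omega
  · have hm := dfsInner_measure y x ny nx n place _ _ _ h
    have hs := wt_step n h2
    rw [stackMeasure_cons]
    simp only [List.length_cons, List.length_nil] at hm
    omega

def dfs (y : Int) (x : Int) (n : Int) (place : List String) : Bool :=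
  dfsLoop y x place [(y, x, n)]

-- ===== PORT B =====
-- Source B: recursive explore(cy, cx, n); the for-loop over the four (dy,dx) pairs is exploreGo.
-- (exploreGo carries the proof n < 2 available at its single call site, for termination only.)
mutual
def explore (y x : Int) (place : List String) (cy cx n : Int) : Bool :=
  if h : 2 ≤ n then false
  else exploreGo y x place cy cx n (by omega) [((0:Int), (1:Int)), (-1, 0), (0, -1), (1, 0)]
termination_by ((2 - n).toNat, 5)
decreasing_by exact Prod.Lex.right _ (by simp)

def exploreGo (y x : Int) (place : List String) (cy cx n : Int) (h : n < 2)
    (ds : List (Int × Int)) : Bool :=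
  match ds with
  | [] => false
  | d :: ds' =>
    if 0 ≤ cy + d.1 ∧ cy + d.1 < 5 ∧ 0 ≤ cx + d.2 ∧ cx + d.2 < 5 then
      if cellAt place (cy + d.1) (cx + d.2) = some 'P' ∧ (cy + d.1 ≠ y ∧ cx + d.2 ≠ x) then true
      else if cellAt place (cy + d.1) (cx + d.2) = some 'O' ∧ explore y x place (cy + d.1) (cx + d.2) (n + 1) = true then true
      else exploreGo y x place cy cx n h ds'
    else exploreGo y x place cy cx n h ds'
termination_by ((2 - n).toNat, ds.length)
decreasing_by
  · exact Prod.Lex.left _ _ (by omega)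
  · exact Prod.Lex.right _ (by simp)
  · exact Prod.Lex.right _ (by simp)
end

def dfs_alt (y : Int) (x : Int) (n : Int) (place : List String) : Bool :=
  explore y x place y x n

-- ===== PRECONDITION & SPEC =====
-- Pre_ excludes (a) grids that are not a full 5x5 (there A's place[ey][ex] may raise IndexError;
-- on some such grids A happens never to touch a missing cell and returns, e.g. the first cite) and
-- (b) negative depth n when the grid is reached (outside the task's natural domain of n ≥ 0;
-- A still returns there, e.g. the second cite).  When n ≥ 2, or no neighbour of (y,x) is in
-- bounds, A returns False without ever indexing place, so such inputs are admitted for any place.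
def Pre_dfs (y : Int) (x : Int) (n : Int) (place : List String) : Prop :=
  2 ≤ n
  ∨ (¬ ((0 ≤ y ∧ y < 5 ∧ ((0 ≤ x + 1 ∧ x + 1 < 5) ∨ (0 ≤ x - 1 ∧ x - 1 < 5)))
        ∨ (0 ≤ x ∧ x < 5 ∧ ((0 ≤ y + 1 ∧ y + 1 < 5) ∨ (0 ≤ y - 1 ∧ y - 1 < 5)))))
  ∨ (0 ≤ n ∧ place.length = 5 ∧ ∀ s ∈ place, PySem.Str.len s = 5)
instance (y : Int) (x : Int) (n : Int) (place : List String) : Decidable (Pre_dfs y x n place) := by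
  unfold Pre_dfs; infer_instance

def pvWitness_dfs : Int × Int × Int × List String :=
  (0, 0, 0, ["OOPXX", "OXXXX", "XXXXX", "XXXXX", "XXXXX"])

def Spec_dfs (y : Int) (x : Int) (n : Int) (place : List String) (out : Bool) : Prop := out = dfs_alt y x n place
instance (y : Int) (x : Int) (n : Int) (place : List String) (out : Bool) : Decidable (Spec_dfs y x n place out) := by unfold Spec_dfs; infer_instance

-- ===== CLAIM (what is proved, stated in full; the proofs are below) =====
def Claim_equal_dfs : Prop := ∀ (y : Int) (x : Int) (n : Int) (place : List String), Dom_dfs y x n place → Pre_dfs y x n place → Spec_dfs y x n place (dfs y x n place)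

-- ===== LEMMAS AND PROOFS =====
-- (the equivalence in fact holds for all inputs; Pre_ marks where the ports are claimed to be
-- faithful to their Pythons, and is not needed by the proof)

-- the per-neighbour test performed by B (as a Bool predicate over a (dy,dx) pair)
def stepB (y x : Int) (place : List String) (n cy cx : Int) (d : Int × Int) : Bool :=
  decide (0 ≤ cy + d.1 ∧ cy + d.1 < 5 ∧ 0 ≤ cx + d.2 ∧ cx + d.2 < 5) &&
  (decide (cellAt place (cy + d.1) (cx + d.2) = some 'P' ∧ (cy + d.1 ≠ y ∧ cx + d.2 ≠ x)) ||
   (decide (cellAt place (cy + d.1) (cx + d.2) = some 'O') && explore y x place (cy + d.1) (cx + d.2) (n + 1)))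

-- A's `return True` condition for direction k
def pA (y x ny nx n : Int) (place : List String) (k : Nat) : Bool :=
  decide ((0 ≤ ny + dyv k ∧ ny + dyv k < 5 ∧ 0 ≤ nx + dxv k ∧ nx + dxv k < 5)
    ∧ (n < 2 ∧ cellAt place (ny + dyv k) (nx + dxv k) = some 'P' ∧ (ny + dyv k ≠ y ∧ nx + dxv k ≠ x)))

-- A's `push` condition for direction k
def oA (ny nx : Int) (place : List String) (k : Nat) : Bool :=
  decide ((0 ≤ ny + dyv k ∧ ny + dyv k < 5 ∧ 0 ≤ nx + dxv k ∧ nx + dxv k < 5)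
    ∧ cellAt place (ny + dyv k) (nx + dxv k) = some 'O')

theorem exploreGo_eq_any (y x : Int) (place : List String) (cy cx n : Int) (h : n < 2) :
    ∀ ds : List (Int × Int),
      exploreGo y x place cy cx n h ds = ds.any (stepB y x place n cy cx) := by
  intro ds
  induction ds with
  | nil => rw [exploreGo]; simp
  | cons d ds' ih =>
    rw [exploreGo]
    simp only [List.any_cons]
    split_ifs with h1 h2 h3
    · simp [stepB, h1, h2]
    · simp [stepB, h1, h3.1, h3.2]
    · -- in-bounds, not P-hit, not (O ∧ recurse): head contributes false
      have hstep : stepB y x place n cy cx d = false := by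
        simp only [stepB, Bool.and_eq_false_iff, Bool.or_eq_false_iff]
        right
        constructor
        · simp [h2]
        · rcases (not_and_or.mp h3) with h4 | h4
          · simp [h4]
          · simp [eq_false_of_ne_true h4]
      rw [hstep, ih, Bool.false_or]
    · have hstep : stepB y x place n cy cx d = false := by
        simp [stepB, h1]
      rw [hstep, ih, Bool.false_or]

theorem explore_eq (y x : Int) (place : List String) (cy cx n : Int) (hn : ¬ 2 ≤ n) :
    explore y x place cy cx n
      = ([((0:Int), (1:Int)), (-1, 0), (0, -1), (1, 0)]).any (stepB y x place n cy cx) := by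
  rw [explore]
  simp only [hn, dite_false]
  exact exploreGo_eq_any y x place cy cx n (by omega) _

theorem inner_isNone (y x ny nx n : Int) (place : List String) :
    ∀ (ks : List Nat) (arr : List (Int × Int × Int)),
      (dfsInner y x ny nx n place ks arr).isNone = ks.any (pA y x ny nx n place) := by
  intro ks
  induction ks with
  | nil => intro arr; rw [dfsInner]; simp
  | cons k ks' ih =>
    intro arr
    rw [dfsInner]
    simp only [List.any_cons]
    split_ifs with h1 h2 h3
    · have hp : pA y x ny nx n place k = true := decide_eq_true ⟨h1, h2⟩
      simp [hp]
    · have hp : pA y x ny nx n place k = false := decide_eq_false (fun hc => h2 hc.2)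
      simp [hp, ih]
    · have hp : pA y x ny nx n place k = false := decide_eq_false (fun hc => h2 hc.2)
      simp [hp, ih]
    · have hp : pA y x ny nx n place k = false := decide_eq_false (fun hc => h1 hc.1)
      simp [hp, ih]

theorem inner_some_any (y x ny nx n : Int) (place : List String) :
    ∀ (ks : List Nat) (arr arr' : List (Int × Int × Int)),
      dfsInner y x ny nx n place ks arr = some arr' →
      ∀ f : Int × Int × Int → Bool,
        arr'.any f
          = (ks.any (fun k => oA ny nx place k && f (ny + dyv k, nx + dxv k, n + 1))
             || arr.any f) := by
  intro ks
  induction ks with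
  | nil =>
    intro arr arr' h f
    rw [dfsInner] at h
    cases h
    simp
  | cons k ks' ih =>
    intro arr arr' h f
    rw [dfsInner] at h
    simp only [List.any_cons]
    split_ifs at h with h1 h2 h3
    · -- O-branch: pushed (ey, ex, n+1)
      rw [ih _ _ h f]
      have ho : oA ny nx place k = true := decide_eq_true ⟨h1, h3⟩
      simp only [List.any_cons, ho, Bool.true_and]
      cases f (ny + dyv k, nx + dxv k, n + 1) <;> simp
    · have ho : oA ny nx place k = false := decide_eq_false (fun hc => h3 hc.2)
      rw [ih _ _ h f]
      simp [ho]
    · have ho : oA ny nx place k = false := decide_eq_false (fun hc => h1 hc.1)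
      rw [ih _ _ h f]
      simp [ho]

-- pointwise bridge: B's test on pair k equals A's P-condition or O-condition for k (given n < 2)
theorem stepB_eq (y x ny nx n : Int) (place : List String) (hn : ¬ 2 ≤ n) (k : Nat) :
    stepB y x place n ny nx (dyv k, dxv k)
      = (pA y x ny nx n place k
         || (oA ny nx place k && explore y x place (ny + dyv k) (nx + dxv k) (n + 1))) := by
  have hn2 : n < 2 := by omega
  by_cases hb : (0 ≤ ny + dyv k ∧ ny + dyv k < 5 ∧ 0 ≤ nx + dxv k ∧ nx + dxv k < 5)
  · by_cases hp : (cellAt place (ny + dyv k) (nx + dxv k) = some 'P' ∧ (ny + dyv k ≠ y ∧ nx + dxv k ≠ x))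
    · have : pA y x ny nx n place k = true := decide_eq_true ⟨hb, hn2, hp.1, hp.2⟩
      simp [stepB, hb, hp, this]
    · have hpa : pA y x ny nx n place k = false :=
        decide_eq_false (fun hc => hp ⟨hc.2.2.1, hc.2.2.2⟩)
      by_cases ho : cellAt place (ny + dyv k) (nx + dxv k) = some 'O'
      · have hoa : oA ny nx place k = true := decide_eq_true ⟨hb, ho⟩
        simp [stepB, hb, hp, ho, hpa, hoa]
      · have hoa : oA ny nx place k = false := decide_eq_false (fun hc => ho hc.2)
        simp [stepB, hb, hp, ho, hpa, hoa]
  · have hpa : pA y x ny nx n place k = false := decide_eq_false (fun hc => hb hc.1)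
    have hoa : oA ny nx place k = false := decide_eq_false (fun hc => hb hc.1)
    simp [stepB, hb, hpa, hoa]

theorem pairs_eq_map :
    ([((0:Int), (1:Int)), (-1, 0), (0, -1), (1, 0)])
      = ([0, 1, 2, 3] : List Nat).map (fun k => (dyv k, dxv k)) := by decide

theorem loop_eq (y x : Int) (place : List String) :
    ∀ (N : Nat) (arr : List (Int × Int × Int)), stackMeasure arr ≤ N →
      dfsLoop y x place arr = arr.any (fun t => explore y x place t.1 t.2.1 t.2.2) := by
  intro N
  induction N with
  | zero =>
    intro arr h
    match arr with
    | [] => rw [dfsLoop]; simp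
    | (ny, nx, n) :: rest =>
      exfalso
      have := wt_pos n
      rw [stackMeasure_cons] at h
      omega
  | succ N ih =>
    intro arr h
    match arr with
    | [] => rw [dfsLoop]; simp
    | (ny, nx, n) :: rest =>
      have hrest : stackMeasure rest ≤ N := by
        have := wt_pos n
        rw [stackMeasure_cons] at h
        omega
      rw [dfsLoop]
      by_cases h2 : 2 ≤ n
      · simp only [h2, dite_true, List.any_cons]
        rw [ih rest hrest, explore]
        simp [h2]
      · simp only [h2, dite_false]
        have hexp : explore y x place ny nx n
            = ([0, 1, 2, 3] : List Nat).any
                (fun k => pA y x ny nx n place k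
                  || (oA ny nx place k && explore y x place (ny + dyv k) (nx + dxv k) (n + 1))) := by
          rw [explore_eq y x place ny nx n h2, pairs_eq_map, List.any_map]
          exact List.any_congr rfl (fun k => stepB_eq y x ny nx n place h2 k)
        split
        · rename_i hinner
          have hany : (([0, 1, 2, 3] : List Nat).any (pA y x ny nx n place)) = true := by
            rw [← inner_isNone y x ny nx n place [0, 1, 2, 3] rest, hinner]; rfl
          simp only [List.any_cons]
          rw [hexp]
          have hl : (([0, 1, 2, 3] : List Nat).any
              (fun k => pA y x ny nx n place k
                || (oA ny nx place k && explore y x place (ny + dyv k) (nx + dxv k) (n + 1)))) = true := by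
            simp only [List.any_eq_true] at hany ⊢
            obtain ⟨k, hk, hpk⟩ := hany
            exact ⟨k, hk, by simp [hpk]⟩
          rw [hl, Bool.true_or]
        · rename_i arr' hinner
          have hm : stackMeasure arr' ≤ N := by
            have hmm := dfsInner_measure y x ny nx n place _ _ _ hinner
            have hs := wt_step n h2
            rw [stackMeasure_cons] at h
            simp only [List.length_cons, List.length_nil] at hmm
            omega
          rw [ih arr' hm,
              inner_some_any y x ny nx n place _ _ _ hinner
                (fun t => explore y x place t.1 t.2.1 t.2.2)]
          have hnone : (([0, 1, 2, 3] : List Nat).any (pA y x ny nx n place)) = false := by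
            rw [← inner_isNone y x ny nx n place [0, 1, 2, 3] rest, hinner]; rfl
          simp only [List.any_cons]
          rw [hexp]
          simp only [List.any_eq_false] at hnone
          have e0 : pA y x ny nx n place 0 = false := eq_false_of_ne_true (hnone 0 (by simp))
          have e1 : pA y x ny nx n place 1 = false := eq_false_of_ne_true (hnone 1 (by simp))
          have e2 : pA y x ny nx n place 2 = false := eq_false_of_ne_true (hnone 2 (by simp))
          have e3 : pA y x ny nx n place 3 = false := eq_false_of_ne_true (hnone 3 (by simp))
          simp [List.any_cons, List.any_nil, e0, e1, e2, e3]

-- ===== VERDICT (by name: the statement is the Claim_ definition above) =====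
theorem dfs_spec : Claim_equal_dfs := by
  intro y x n place _ _
  unfold Spec_dfs dfs dfs_alt
  rw [loop_eq y x place (stackMeasure [(y, x, n)]) [(y, x, n)] le_rfl]
  simp
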